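-- pv_equiv track=rewrite | github.com/rileyhitthefan/google_foobar_archive | Level3/Challenge 2/l3c2.py | l3c2
-- ===== SOURCE A (Python) =====
-- def l3c2(l):
--     div = [0] * len(l)
--     count = 0
--     for i in range(len(l)):
--         for j in range(i):
--             if l[i] % l[j] == 0:
--                 div[i] += 1
--                 count = div[j]
--     return count
-- ===== SOURCE B (Python) =====
-- def l3c2(l):
--     # Phase 1: build the full divisor-count table.
--     div = [sum(1 for j in range(i) if l[i] % l[j] == 0) for i in range(len(l))]
--     # Phase 2: backward search for the last divisible pair (largest i, then largest j).
--     for i in range(len(l) - 1, -1, -1):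
--         for j in range(i - 1, -1, -1):
--             if l[i] % l[j] == 0:
--                 return div[j]
--     return 0
-- ===== Notes on version B (the rewrite author's own statement) =====
-- stated objective: alternative
-- what changed: Splits A's single interleaved pass into two phases: a comprehension that builds the whole divisor-count table, then a separate backward (largest-i, largest-j first) scan that returns the table entry of the first divisible pair found, replacing A's forward last-overwrite accumulator.
import Mathlib
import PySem

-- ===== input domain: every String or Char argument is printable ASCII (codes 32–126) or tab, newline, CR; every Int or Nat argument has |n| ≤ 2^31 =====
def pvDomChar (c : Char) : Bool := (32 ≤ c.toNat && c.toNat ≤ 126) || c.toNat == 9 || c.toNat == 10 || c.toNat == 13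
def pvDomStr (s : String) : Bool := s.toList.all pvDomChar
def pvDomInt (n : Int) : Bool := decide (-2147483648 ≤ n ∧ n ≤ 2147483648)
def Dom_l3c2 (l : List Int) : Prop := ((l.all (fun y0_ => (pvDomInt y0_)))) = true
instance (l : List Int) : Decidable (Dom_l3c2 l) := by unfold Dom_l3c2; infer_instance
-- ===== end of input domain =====

-- B rebuilds A's result in two phases (full divisor-count table, then a backward
-- scan for the last divisible pair) instead of A's interleaved forward accumulator.

-- ===== PORT A =====
-- for i in range(len(l)): for j in range(i): if l[i] % l[j] == 0: div[i] += 1; count = div[j]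
def l3c2 (l : List Int) : Int :=
  (((PySem.List.pyRange 0 (l.length : Int) 1).foldl (fun (st : List Int × Int) i =>
      (PySem.List.pyRange 0 i 1).foldl (fun (st : List Int × Int) j =>
        if PySem.Int.mod (PySem.List.pyGetD l i 0) (PySem.List.pyGetD l j 0) = 0 then
          let div' := PySem.List.pySetD st.1 i (PySem.List.pyGetD st.1 i 0 + 1)
          (div', PySem.List.pyGetD div' j 0)
        else st) st)
    (List.replicate l.length 0, 0))).2

-- ===== PORT B =====
-- div = [sum(1 for j in range(i) if l[i] % l[j] == 0) for i in range(len(l))]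
-- then backward scan: first (largest i, then largest j) pair with l[i] % l[j] == 0 → div[j]; else 0
def l3c2_alt (l : List Int) : Int :=
  let div : List Int := (PySem.List.pyRange 0 (l.length : Int) 1).map (fun i =>
    (((PySem.List.pyRange 0 i 1).countP (fun j =>
      PySem.Int.mod (PySem.List.pyGetD l i 0) (PySem.List.pyGetD l j 0) == 0) : Nat) : Int))
  match (PySem.List.pyRange ((l.length : Int) - 1) (-1) (-1)).findSome? (fun i =>
      (PySem.List.pyRange (i - 1) (-1) (-1)).findSome? (fun j =>
        if PySem.Int.mod (PySem.List.pyGetD l i 0) (PySem.List.pyGetD l j 0) = 0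
        then some (PySem.List.pyGetD div j 0) else none)) with
  | some v => v
  | none => 0

-- ===== PRECONDITION & SPEC =====
-- Pre_ excludes exactly the inputs where Python A raises ZeroDivisionError:
-- a 0 anywhere except the last position is eventually used as a modulo divisor.
def Pre_l3c2 (l : List Int) : Prop := (0 : Int) ∉ l.dropLast
instance (l : List Int) : Decidable (Pre_l3c2 l) := by unfold Pre_l3c2; infer_instance
def pvWitness_l3c2 : List Int := [2, 4, 8]

def Spec_l3c2 (l : List Int) (out : Int) : Prop := out = l3c2_alt l
instance (l : List Int) (out : Int) : Decidable (Spec_l3c2 l out) := by unfold Spec_l3c2; infer_instance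

-- ===== CLAIM (what is proved, stated in full; the proofs are below) =====
def Claim_equal_l3c2 : Prop := ∀ (l : List Int), Dom_l3c2 l → Pre_l3c2 l → Spec_l3c2 l (l3c2 l)

-- ===== LEMMAS AND PROOFS =====

-- the divisibility test at Nat indices
def pvP (l : List Int) (i j : Nat) : Bool := PySem.Int.mod (l.getD i 0) (l.getD j 0) == 0
-- final value of div[i]
def pvD (l : List Int) (i : Nat) : Int := (((List.range i).countP (pvP l i) : Nat) : Int)
-- value at the last hit j < t in row i, if any (searched backwards)
def pvHit (l : List Int) (i t : Nat) : Option Int :=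
  (List.range t).reverse.findSome? (fun j => if pvP l i j then some (pvD l j) else none)
-- value at the last hit among rows i' < i, if any
def pvOpt (l : List Int) (i : Nat) : Option Int :=
  (List.range i).reverse.findSome? (fun i' => pvHit l i' i')
-- Nat-index model of A's loop
def pvInner (l : List Int) (i : Nat) (st : List Int × Int) : List Int × Int :=
  (List.range i).foldl (fun st j =>
    if pvP l i j then
      let div' := st.1.set i (st.1.getD i 0 + 1)
      (div', div'.getD j 0)
    else st) st
def pvOuter (l : List Int) (n : Nat) : List Int × Int :=
  (List.range n).foldl (fun st i => pvInner l i st) (List.replicate l.length 0, 0)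

theorem pv_findSome?_congr {α β : Type} (f g : α → Option β) (xs : List α)
    (h : ∀ x ∈ xs, f x = g x) : xs.findSome? f = xs.findSome? g := by
  induction xs with
  | nil => rfl
  | cons x t ih =>
    simp only [List.findSome?_cons, h x (List.mem_cons_self),
      ih (fun y hy => h y (List.mem_cons_of_mem x hy))]

theorem pv_getD_set (xs : List Int) (i k : Nat) (v d : Int) (hi : i < xs.length) :
    (xs.set i v).getD k d = if i = k then v else xs.getD k d := by
  by_cases h : i = k
  · subst h; simp [List.getD, hi]
  · simp [List.getD, h]

theorem pvHit_succ (l : List Int) (i t : Nat) :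
    pvHit l i (t+1) = if pvP l i t then some (pvD l t) else pvHit l i t := by
  unfold pvHit
  rw [List.range_succ, List.reverse_append]
  simp only [List.reverse_singleton, List.singleton_append, List.findSome?_cons]
  cases hp : pvP l i t <;> simp

theorem pvInner_inv (l : List Int) (i : Nat) (hi : i < l.length)
    (st : List Int × Int)
    (hlen : st.1.length = l.length)
    (hlt : ∀ k, k < i → st.1.getD k 0 = pvD l k)
    (hge : ∀ k, i ≤ k → st.1.getD k 0 = 0)
    (t : Nat) (ht : t ≤ i) :
    ((List.range t).foldl (fun st j =>
      if pvP l i j then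
        let div' := st.1.set i (st.1.getD i 0 + 1)
        (div', div'.getD j 0)
      else st) st).1.length = l.length ∧
    (∀ k, k < i → ((List.range t).foldl (fun st j =>
      if pvP l i j then
        let div' := st.1.set i (st.1.getD i 0 + 1)
        (div', div'.getD j 0)
      else st) st).1.getD k 0 = pvD l k) ∧
    ((List.range t).foldl (fun st j =>
      if pvP l i j then
        let div' := st.1.set i (st.1.getD i 0 + 1)
        (div', div'.getD j 0)
      else st) st).1.getD i 0 = (((List.range t).countP (pvP l i) : Nat) : Int) ∧
    (∀ k, i < k → ((List.range t).foldl (fun st j =>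
      if pvP l i j then
        let div' := st.1.set i (st.1.getD i 0 + 1)
        (div', div'.getD j 0)
      else st) st).1.getD k 0 = 0) ∧
    ((List.range t).foldl (fun st j =>
      if pvP l i j then
        let div' := st.1.set i (st.1.getD i 0 + 1)
        (div', div'.getD j 0)
      else st) st).2 = (pvHit l i t).getD st.2 := by
  induction t with
  | zero =>
    refine ⟨hlen, hlt, ?_, fun k hk => hge k (le_of_lt hk), rfl⟩
    simpa using hge i le_rfl
  | succ t ih =>
    have ht' : t ≤ i := Nat.le_of_succ_le ht
    have htlt : t < i := ht
    obtain ⟨ih1, ih2, ih3, ih4, ih5⟩ := ih ht'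
    rw [List.range_succ, List.foldl_append, List.foldl_cons, List.foldl_nil]
    set st' := (List.range t).foldl (fun st j =>
      if pvP l i j then
        let div' := st.1.set i (st.1.getD i 0 + 1)
        (div', div'.getD j 0)
      else st) st with hst'
    rw [pvHit_succ]
    by_cases hp : pvP l i t
    · simp only [hp, if_true]
      have hilen : i < st'.1.length := by rw [ih1]; exact hi
      refine ⟨by simpa using ih1, ?_, ?_, ?_, ?_⟩
      · intro k hk
        rw [pv_getD_set _ _ _ _ _ hilen, if_neg (by omega)]
        exact ih2 k hk
      · rw [pv_getD_set _ _ _ _ _ hilen, if_pos rfl, ih3,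
          List.countP_append, List.countP_cons, List.countP_nil, hp]
        push_cast
        simp
      · intro k hk
        rw [pv_getD_set _ _ _ _ _ hilen, if_neg (by omega)]
        exact ih4 k hk
      · rw [pv_getD_set _ _ _ _ _ hilen, if_neg (by omega)]
        exact ih2 t htlt
    · simp only [hp]
      simp only [Bool.not_eq_true] at hp
      rw [List.countP_append, List.countP_cons, List.countP_nil, hp]
      simpa using ⟨ih1, ih2, ih3, ih4, ih5⟩

theorem pvOpt_succ (l : List Int) (n : Nat) :
    pvOpt l (n+1) = ((pvHit l n n).orElse (fun _ => pvOpt l n)) := by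
  unfold pvOpt
  rw [List.range_succ, List.reverse_append]
  simp only [List.reverse_singleton, List.singleton_append, List.findSome?_cons]
  cases pvHit l n n <;> rfl

theorem pvOuter_inv (l : List Int) (n : Nat) (hn : n ≤ l.length) :
    (pvOuter l n).1.length = l.length ∧
    (∀ k, k < n → (pvOuter l n).1.getD k 0 = pvD l k) ∧
    (∀ k, n ≤ k → (pvOuter l n).1.getD k 0 = 0) ∧
    (pvOuter l n).2 = (pvOpt l n).getD 0 := by
  induction n with
  | zero =>
    refine ⟨by simp [pvOuter], by omega, fun k _ => ?_, rfl⟩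
    show (List.replicate l.length (0:Int)).getD k 0 = 0
    simp [List.getD, List.getElem?_replicate]
    split <;> rfl
  | succ n ih =>
    have hn' : n ≤ l.length := Nat.le_of_succ_le hn
    have hnlt : n < l.length := hn
    obtain ⟨ih1, ih2, ih3, ih4⟩ := ih hn'
    have houter : pvOuter l (n+1) = pvInner l n (pvOuter l n) := by
      unfold pvOuter
      rw [List.range_succ, List.foldl_append, List.foldl_cons, List.foldl_nil]
    obtain ⟨c1, c2, c3, c4, c5⟩ := pvInner_inv l n hnlt (pvOuter l n) ih1 ih2 ih3 n le_rfl
    rw [houter]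
    unfold pvInner
    refine ⟨c1, ?_, ?_, ?_⟩
    · intro k hk
      rcases Nat.lt_succ_iff_lt_or_eq.mp hk with h | h
      · exact c2 k h
      · subst h; exact c3
    · intro k hk
      exact c4 k (by omega)
    · rw [c5, ih4, pvOpt_succ]
      cases pvHit l n n <;> rfl

theorem pv_a_model (l : List Int) : l3c2 l = (pvOuter l l.length).2 := by
  unfold l3c2 pvOuter pvInner
  rw [PySem.List.pyRange_zero_nat, List.foldl_map]
  congr 2
  funext st i
  rw [PySem.List.pyRange_zero_nat, List.foldl_map]
  congr 1
  funext st j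
  simp [pvP, beq_iff_eq]

theorem pv_a_eq (l : List Int) : l3c2 l = (pvOpt l l.length).getD 0 := by
  rw [pv_a_model]
  exact (pvOuter_inv l l.length le_rfl).2.2.2

theorem pv_alt_eq (l : List Int) : l3c2_alt l = (pvOpt l l.length).getD 0 := by
  have hout : PySem.List.pyRange ((l.length : Int) - 1) (-1) (-1)
      = ((List.range l.length).reverse.map (Nat.cast : Nat → Int)) := by
    rw [PySem.List.pyRange_neg_one_eq_reverse]
    norm_num [PySem.List.pyRange_zero_nat, List.map_reverse]
  unfold l3c2_alt pvOpt
  simp only [hout, List.findSome?_map]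
  have key : ∀ i ∈ (List.range l.length).reverse,
      ((fun (ii : Int) =>
        (PySem.List.pyRange (ii - 1) (-1) (-1)).findSome? (fun j =>
          if PySem.Int.mod (PySem.List.pyGetD l ii 0) (PySem.List.pyGetD l j 0) = 0
          then some (PySem.List.pyGetD ((PySem.List.pyRange 0 (l.length : Int) 1).map (fun i =>
            (((PySem.List.pyRange 0 i 1).countP (fun j =>
              PySem.Int.mod (PySem.List.pyGetD l i 0) (PySem.List.pyGetD l j 0) == 0) : Nat) : Int))) j 0)
          else none)) ∘ (Nat.cast : Nat → Int)) i = pvHit l i i := by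
    intro i hi
    simp only [List.mem_reverse, List.mem_range] at hi
    have hin : PySem.List.pyRange ((i:Int) - 1) (-1) (-1)
        = ((List.range i).reverse.map (Nat.cast : Nat → Int)) := by
      rw [PySem.List.pyRange_neg_one_eq_reverse]
      norm_num [PySem.List.pyRange_zero_nat, List.map_reverse]
    simp only [Function.comp_apply, hin, List.findSome?_map]
    unfold pvHit
    apply pv_findSome?_congr
    intro j hj
    simp only [List.mem_reverse, List.mem_range] at hj
    have hjn : j < l.length := lt_trans hj hi
    rw [Function.comp_apply, PySem.List.pyGetD_map_pyRange _ l.length j 0 hjn]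
    simp only [pvD, PySem.List.pyRange_zero_nat, List.countP_map, Function.comp_def]
    have hfun : (fun x : Nat => (PySem.Int.mod (PySem.List.pyGetD l (j:Int) 0)
        (PySem.List.pyGetD l (x:Int) 0) == 0)) = pvP l j := by
      funext x; simp [pvP]
    rw [hfun]
    simp [pvP, beq_iff_eq]
  rw [pv_findSome?_congr _ _ _ key]
  cases h : (List.range l.length).reverse.findSome? (fun i' => pvHit l i' i') <;> rfl

-- ===== VERDICT (by name: the statement is the Claim_ definition above) =====
theorem l3c2_spec : Claim_equal_l3c2 := by
  intro l _ _
  unfold Spec_l3c2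
  rw [pv_a_eq, pv_alt_eq]
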